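-- pv_equiv track=rewrite | github.com/maksooGH/FoodcomChatbot | step03_get_categories.py | add_categories_to_data
-- ===== SOURCE A (Python) =====
-- def add_categories_to_data(data):
--     for i in range(len(data)):
--         if 0 <= i <= 39:
--             data[i]['cat'] = 'dairy'
--         elif 40 <= i <= 71:
--             data[i]['cat'] = 'plant-based'
--         elif 72 <= i <= 127:
--             data[i]['cat'] = 'additives'
--         elif 128 <= i <= 130:
--             data[i]['cat'] = 'fmcg-en'
--         else:
--             data[i]['cat'] = 'other/category-3'
--     return data
-- ===== SOURCE B (Python) =====
-- def add_categories_to_data(data):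
--     segments = [(0, 40, 'dairy'), (40, 72, 'plant-based'),
--                 (72, 128, 'additives'), (128, 131, 'fmcg-en')]
--     n = len(data)
--     for start, end, label in segments:
--         for i in range(start, min(end, n)):
--             data[i]['cat'] = label
--     for i in range(131, n):
--         data[i]['cat'] = 'other/category-3'
--     return data
-- ===== Notes on version B (the rewrite author's own statement) =====
-- stated objective: alternative
-- what changed: Replaces the per-index if/elif chain with a data-driven table of half-open category segments: an outer loop over the segments and an inner loop over each clamped index range, plus one tail loop for the 'other' bucket, instead of re-deciding the category branch for every index.
import Mathlib
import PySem

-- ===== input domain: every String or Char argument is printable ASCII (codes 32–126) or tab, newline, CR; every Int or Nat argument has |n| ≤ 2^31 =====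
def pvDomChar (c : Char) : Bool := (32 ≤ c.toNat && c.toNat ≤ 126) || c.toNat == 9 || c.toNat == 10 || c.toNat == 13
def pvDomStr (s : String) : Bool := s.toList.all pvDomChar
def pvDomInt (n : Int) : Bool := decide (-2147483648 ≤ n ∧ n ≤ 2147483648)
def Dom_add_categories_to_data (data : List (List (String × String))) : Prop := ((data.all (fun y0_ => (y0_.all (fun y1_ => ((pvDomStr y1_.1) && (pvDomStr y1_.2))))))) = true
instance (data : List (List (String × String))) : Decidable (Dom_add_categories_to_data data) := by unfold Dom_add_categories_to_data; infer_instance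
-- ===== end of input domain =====

-- B replaces A's per-index if/elif chain by a table of half-open category segments with
-- nested clamped range loops plus a tail loop (a different decomposition, same O(n) cost).
-- Both Pythons mutate `data` in place and return it; the equivalence proved is about the return value.


-- shared helper: Python's d[k] = v on a dict as association list
-- (overwrite the first binding of k in place; append if absent) — exact for dicts (unique keys)
def pySetItem (d : List (String × String)) (k v : String) : List (String × String) :=
  match d with
  | [] => [(k, v)]
  | (k', v') :: rest =>
    if k' = k then (k, v) :: rest else (k', v') :: pySetItem rest k v

-- ===== PORT A =====
def add_categories_to_data (data : List (List (String × String))) : List (List (String × String)) :=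
  (PySem.List.pyRange 0 (PySem.List.len data) 1).foldl
    (fun acc i =>
      if 0 ≤ i ∧ i ≤ 39 then
        PySem.List.pySetD acc i (pySetItem (PySem.List.pyGetD acc i []) "cat" "dairy")
      else if 40 ≤ i ∧ i ≤ 71 then
        PySem.List.pySetD acc i (pySetItem (PySem.List.pyGetD acc i []) "cat" "plant-based")
      else if 72 ≤ i ∧ i ≤ 127 then
        PySem.List.pySetD acc i (pySetItem (PySem.List.pyGetD acc i []) "cat" "additives")
      else if 128 ≤ i ∧ i ≤ 130 then
        PySem.List.pySetD acc i (pySetItem (PySem.List.pyGetD acc i []) "cat" "fmcg-en")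
      else
        PySem.List.pySetD acc i (pySetItem (PySem.List.pyGetD acc i []) "cat" "other/category-3"))
    data

-- ===== PORT B =====
def add_categories_to_data_alt (data : List (List (String × String))) : List (List (String × String)) :=
  let segments : List (Int × Int × String) :=
    [(0, 40, "dairy"), (40, 72, "plant-based"), (72, 128, "additives"), (128, 131, "fmcg-en")]
  let n : Int := PySem.List.len data
  let d1 := segments.foldl
    (fun acc seg =>
      (PySem.List.pyRange seg.1 (min seg.2.1 n) 1).foldl
        (fun a i => PySem.List.pySetD a i (pySetItem (PySem.List.pyGetD a i []) "cat" seg.2.2)) acc)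
    data
  (PySem.List.pyRange 131 n 1).foldl
    (fun a i => PySem.List.pySetD a i (pySetItem (PySem.List.pyGetD a i []) "cat" "other/category-3")) d1

-- ===== PRECONDITION & SPEC =====
def Spec_add_categories_to_data (data : List (List (String × String))) (out : List (List (String × String))) : Prop := out = add_categories_to_data_alt data
instance (data : List (List (String × String))) (out : List (List (String × String))) : Decidable (Spec_add_categories_to_data data out) := by unfold Spec_add_categories_to_data; infer_instance

-- ===== CLAIM (what is proved, stated in full; the proofs are below) =====
def Claim_equal_add_categories_to_data : Prop := ∀ (data : List (List (String × String))), Dom_add_categories_to_data data → Spec_add_categories_to_data data (add_categories_to_data data)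

-- ===== LEMMAS AND PROOFS =====

lemma foldl_pySetD_getElem? (f : Int → List (String × String) → List (String × String)) :
    ∀ (n : Nat) (a b : Int), 0 ≤ a → (b - a).toNat = n →
    ∀ (xs : List (List (String × String))) (k : Nat),
      ((PySem.List.pyRange a b 1).foldl
          (fun acc i => PySem.List.pySetD acc i (f i (PySem.List.pyGetD acc i []))) xs)[k]?
        = if a ≤ (k : Int) ∧ (k : Int) < b then (xs[k]?).map (f (k : Int)) else xs[k]? := by
  intro n
  induction n with
  | zero =>
    intro a b ha hn xs k
    rw [PySem.List.pyRange_one_eq_nil (by omega)]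
    simp only [List.foldl_nil]
    rw [if_neg (by omega)]
  | succ m ih =>
    intro a b ha hn xs k
    rw [PySem.List.pyRange_one_cons (by omega)]
    simp only [List.foldl_cons]
    rw [ih (a + 1) b (by omega) (by omega)]
    rw [PySem.List.pySetD_of_nonneg _ _ ha]
    by_cases hk : (k : Int) = a
    · have hka : k = a.toNat := by omega
      subst hka
      by_cases hlen : a.toNat < xs.length
      · rw [PySem.List.pyGetD_eq_getElem xs [] ha (by omega)]
        rw [if_neg (by omega), if_pos (by omega)]
        rw [List.getElem?_set_self' ]
        simp [hlen, hk]
      · rw [List.set_eq_of_length_le (by omega)]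
        rw [List.getElem?_eq_none (by omega : xs.length ≤ a.toNat)]
        simp
    · have hne : a.toNat ≠ k := by omega
      rw [List.getElem?_set_ne hne]
      by_cases h1 : a ≤ (k:Int) ∧ (k:Int) < b
      · rw [if_pos (by omega), if_pos h1]
      · rw [if_neg (by omega), if_neg h1]

def fA (i : Int) (d : List (String × String)) : List (String × String) :=
  if 0 ≤ i ∧ i ≤ 39 then pySetItem d "cat" "dairy"
  else if 40 ≤ i ∧ i ≤ 71 then pySetItem d "cat" "plant-based"
  else if 72 ≤ i ∧ i ≤ 127 then pySetItem d "cat" "additives"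
  else if 128 ≤ i ∧ i ≤ 130 then pySetItem d "cat" "fmcg-en"
  else pySetItem d "cat" "other/category-3"

set_option maxHeartbeats 1000000 in
theorem pv_agree (data : List (List (String × String))) :
    add_categories_to_data data = add_categories_to_data_alt data := by
  unfold add_categories_to_data add_categories_to_data_alt
  simp only [List.foldl_cons, List.foldl_nil]
  have hA : (fun (acc : List (List (String × String))) (i : Int) =>
      if 0 ≤ i ∧ i ≤ 39 then
        PySem.List.pySetD acc i (pySetItem (PySem.List.pyGetD acc i []) "cat" "dairy")
      else if 40 ≤ i ∧ i ≤ 71 then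
        PySem.List.pySetD acc i (pySetItem (PySem.List.pyGetD acc i []) "cat" "plant-based")
      else if 72 ≤ i ∧ i ≤ 127 then
        PySem.List.pySetD acc i (pySetItem (PySem.List.pyGetD acc i []) "cat" "additives")
      else if 128 ≤ i ∧ i ≤ 130 then
        PySem.List.pySetD acc i (pySetItem (PySem.List.pyGetD acc i []) "cat" "fmcg-en")
      else
        PySem.List.pySetD acc i (pySetItem (PySem.List.pyGetD acc i []) "cat" "other/category-3"))
      = (fun acc i => PySem.List.pySetD acc i (fA i (PySem.List.pyGetD acc i []))) := by
    funext acc i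
    simp only [fA]
    split_ifs <;> rfl
  rw [hA]
  apply List.ext_getElem?
  intro k
  rw [foldl_pySetD_getElem? fA _ 0 (PySem.List.len data) (by omega) rfl data k]
  rw [foldl_pySetD_getElem? (fun _ d => pySetItem d "cat" "other/category-3") _ 131 (PySem.List.len data) (by omega) rfl]
  rw [foldl_pySetD_getElem? (fun _ d => pySetItem d "cat" "fmcg-en") _ 128 (min 131 (PySem.List.len data)) (by omega) rfl]
  rw [foldl_pySetD_getElem? (fun _ d => pySetItem d "cat" "additives") _ 72 (min 128 (PySem.List.len data)) (by omega) rfl]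
  rw [foldl_pySetD_getElem? (fun _ d => pySetItem d "cat" "plant-based") _ 40 (min 72 (PySem.List.len data)) (by omega) rfl]
  rw [foldl_pySetD_getElem? (fun _ d => pySetItem d "cat" "dairy") _ 0 (min 40 (PySem.List.len data)) (by omega) rfl]
  simp only [PySem.List.len_eq] at *
  by_cases hk : k < data.length
  · rw [List.getElem?_eq_getElem hk]
    split_ifs <;> try omega
    all_goals simp only [Option.map_some, fA]
    all_goals (split_ifs <;> first | rfl | omega)
  · rw [List.getElem?_eq_none (by omega)]
    split_ifs <;> simp

-- ===== VERDICT (by name: the statement is the Claim_ definition above) =====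
theorem add_categories_to_data_spec : Claim_equal_add_categories_to_data := by
  intro data _
  exact pv_agree data
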